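-- pv_equiv track=rewrite | github.com/paiv/aoc2019 | code/22-2-slam-shuffle/solve.py | solve
-- ===== SOURCE A (Python) =====
-- def solve(text, m=119315717514047, t=101741582076661, q=2020):
--
--     def simplify(text):
--         a = 1
--         b = 0
--
--         for op in text.strip().splitlines():
--             arg = op.split()[-1]
--
--             if op.startswith('deal with'):
--                 v = int(arg)
--                 a = a * v % m
--                 b = b * v % m
--
--             elif op.startswith('deal into'):
--                 a = -a % m
--                 b = -(b + 1) % m
--
--             elif op.startswith('cut'):
--                 v = int(arg)
--                 b = (b - v) % m
--
--         return (a, b)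
--
--     a, b = simplify(text)
--
--     # affine transform, augmented matrix:
--     #   a b
--     #   0 1
--     a, b, *_  = mpow((a, b, 0, 1), t, m)
--
--     # Ax+B = q mod m
--     # x = ((q - B) mod m) * modinv(A, m)
--
--     x = (q - b) * modinv(a, m) % m
--     return x
--
-- def modinv(n, mod):
--     t, w, r = 0, 1, mod
--     while n:
--         (q, n), r = divmod(r, n), n
--         t, w = w, t - q * w
--     if r > 1: raise Exception('not invertible ' + repr(n))
--     if t < 0: t += mod
--     return t
--
-- def mmul(a, b, mod):
--     return (
--         (a[0] * b[0] + a[1] * b[2]) % mod,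
--         (a[0] * b[1] + a[1] * b[3]) % mod,
--         (a[2] * b[0] + a[3] * b[2]) % mod,
--         (a[2] * b[1] + a[3] * b[3]) % mod)
--
-- def mpow(base, exp, mod):
--     ans = (1, 0, 0, 1)
--     while exp > 0:
--         exp, t = divmod(exp, 2)
--         if t:
--             ans = mmul(ans, base, mod)
--         base = mmul(base, base, mod)
--     return ans
-- ===== SOURCE B (Python) =====
-- def solve(text, m=119315717514047, t=101741582076661, q=2020):
--     # Each shuffle line is itself an affine map x -> c*x + d; compose them with a
--     # fold, then raise the composite to the t-th power by recursive halving on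
--     # (a, b) pairs instead of squaring an augmented 2x2 matrix.
--
--     def affine(op):
--         arg = op.split()[-1]
--         if op.startswith('deal with'):
--             return (int(arg), 0)
--         if op.startswith('deal into'):
--             return (-1, -1)
--         if op.startswith('cut'):
--             return (1, -int(arg))
--         return (1, 0)
--
--     def compose(f, g):
--         # f applied after g
--         return (f[0] * g[0] % m, (f[0] * g[1] + f[1]) % m)
--
--     def power(f, e):
--         if e < 1:
--             return (1, 0)
--         if e == 1:
--             return (f[0] % m, f[1] % m)
--         h = power(compose(f, f), e // 2)
--         return compose(h, f) if e % 2 else h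
--
--     f = (1, 0)
--     for op in text.strip().splitlines():
--         f = compose(affine(op), f)
--
--     a, b = power(f, t)
--     return (q - b) * modinv(a, m) % m
--
-- def modinv(n, mod):
--     t, w, r = 0, 1, mod
--     while n:
--         (q, n), r = divmod(r, n), n
--         t, w = w, t - q * w
--     if r > 1: raise Exception('not invertible ' + repr(n))
--     if t < 0: t += mod
--     return t
-- ===== Notes on version B (the rewrite author's own statement) =====
-- stated objective: simpler
-- what changed: B drops the augmented 2x2-matrix machinery: each shuffle line is mapped to its own affine pair and folded with affine composition, and the t-th power is computed by recursive halving directly on (a,b) pairs instead of iterative square-and-multiply on 4-entry matrices (mpow/mmul are gone).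
import Mathlib
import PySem

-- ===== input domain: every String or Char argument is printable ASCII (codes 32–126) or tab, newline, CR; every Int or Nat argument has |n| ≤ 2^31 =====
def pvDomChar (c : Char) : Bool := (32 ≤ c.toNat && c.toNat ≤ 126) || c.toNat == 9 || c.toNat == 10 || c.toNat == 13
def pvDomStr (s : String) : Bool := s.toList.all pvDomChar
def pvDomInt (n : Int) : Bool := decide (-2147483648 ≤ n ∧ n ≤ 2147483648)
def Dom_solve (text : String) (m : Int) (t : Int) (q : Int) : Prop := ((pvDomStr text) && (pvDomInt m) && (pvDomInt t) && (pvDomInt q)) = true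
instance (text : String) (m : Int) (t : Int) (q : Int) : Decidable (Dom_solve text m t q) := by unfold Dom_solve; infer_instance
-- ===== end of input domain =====

-- B replaces the 2x2-matrix square-and-multiply (mpow/mmul) by recursive halving
-- exponentiation directly on affine (a,b) pairs, and builds the composite shuffle by
-- mapping each line to its own affine map and folding composition: simpler, no matrices.

-- termination helper for the modinv loop (the port cites it in decreasing_by)
theorem pymod_natAbs_lt (r n : Int) (hn : n ≠ 0) : (PySem.Int.mod r n).natAbs < n.natAbs := by
  rcases lt_or_gt_of_ne hn with h | h
  · have := PySem.Int.mod_neg_bounds r h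
    omega
  · have h1 := PySem.Int.mod_nonneg r h
    have h2 := PySem.Int.mod_lt r h
    omega

-- ===== PORT A =====
-- shared helper: the module-level 'modinv' both Source A and Source B define (extended Euclid).
-- Python raises 'not invertible' when the final r exceeds 1; the port returns 0 there
-- (that branch is excluded by Pre_solve).
def modinvLoop (tt w r n : Int) : Int × Int :=
  if hn : n = 0 then (tt, r)
  else modinvLoop w (tt - PySem.Int.floordiv r n * w) n (PySem.Int.mod r n)
termination_by n.natAbs
decreasing_by exact pymod_natAbs_lt r n hn

def modinv (n m : Int) : Int :=
  let (tt, r) := modinvLoop 0 1 m n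
  if r > 1 then 0
  else if tt < 0 then tt + m else tt

def mmul (a b : Int × Int × Int × Int) (m : Int) : Int × Int × Int × Int :=
  (PySem.Int.mod (a.1 * b.1 + a.2.1 * b.2.2.1) m,
   PySem.Int.mod (a.1 * b.2.1 + a.2.1 * b.2.2.2) m,
   PySem.Int.mod (a.2.2.1 * b.1 + a.2.2.2 * b.2.2.1) m,
   PySem.Int.mod (a.2.2.1 * b.2.1 + a.2.2.2 * b.2.2.2) m)

def mpowLoop (ans base : Int × Int × Int × Int) (exp m : Int) : Int × Int × Int × Int :=
  if h : 0 < exp then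
    let tbit := PySem.Int.mod exp 2
    let ans' := if tbit ≠ 0 then mmul ans base m else ans
    mpowLoop ans' (mmul base base m) (PySem.Int.floordiv exp 2) m
  else ans
termination_by exp.toNat
decreasing_by
  rw [PySem.Int.floordiv_eq_ediv_of_pos (by norm_num : (0:Int) < 2)]
  omega

def mpow (base : Int × Int × Int × Int) (exp m : Int) : Int × Int × Int × Int :=
  mpowLoop (1, 0, 0, 1) base exp m

-- one iteration of simplify's loop body (Source A); int(arg) / op.split()[-1] failures
-- (ValueError / IndexError) are Python raises, excluded by Pre_solve, junk-defaulted here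
def simplifyStep (m : Int) (ab : Int × Int) (op : List Char) : Int × Int :=
  let arg := (PySem.List.pyGet? (PySem.Chars.split₀ op) (-1)).getD []
  if PySem.Chars.startswith op "deal with".toList then
    let v := (PySem.Int.ofChars? arg).getD 0
    (PySem.Int.mod (ab.1 * v) m, PySem.Int.mod (ab.2 * v) m)
  else if PySem.Chars.startswith op "deal into".toList then
    (PySem.Int.mod (-ab.1) m, PySem.Int.mod (-(ab.2 + 1)) m)
  else if PySem.Chars.startswith op "cut".toList then
    let v := (PySem.Int.ofChars? arg).getD 0
    (ab.1, PySem.Int.mod (ab.2 - v) m)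
  else ab

def solve (text : String) (m : Int) (t : Int) (q : Int) : Int :=
  let lines := PySem.Chars.splitlines (PySem.Chars.strip text.toList)
  let ab := lines.foldl (simplifyStep m) (1, 0)
  let r := mpow (ab.1, ab.2, 0, 1) t m
  PySem.Int.mod ((q - r.2.1) * modinv r.1 m) m

-- ===== PORT B =====
def affineOf (m : Int) (op : List Char) : Int × Int :=
  let arg := (PySem.List.pyGet? (PySem.Chars.split₀ op) (-1)).getD []
  if PySem.Chars.startswith op "deal with".toList then
    ((PySem.Int.ofChars? arg).getD 0, 0)
  else if PySem.Chars.startswith op "deal into".toList then (-1, -1)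
  else if PySem.Chars.startswith op "cut".toList then
    (1, -((PySem.Int.ofChars? arg).getD 0))
  else (1, 0)

def composeAff (m : Int) (f g : Int × Int) : Int × Int :=
  (PySem.Int.mod (f.1 * g.1) m, PySem.Int.mod (f.1 * g.2 + f.2) m)

def affPower (m : Int) (f : Int × Int) (e : Int) : Int × Int :=
  if e < 1 then (1, 0)
  else if e = 1 then (PySem.Int.mod f.1 m, PySem.Int.mod f.2 m)
  else
    let h := affPower m (composeAff m f f) (PySem.Int.floordiv e 2)
    if PySem.Int.mod e 2 ≠ 0 then composeAff m h f else h
termination_by e.toNat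
decreasing_by
  rw [PySem.Int.floordiv_eq_ediv_of_pos (by norm_num : (0:Int) < 2)]
  omega

def solve_alt (text : String) (m : Int) (t : Int) (q : Int) : Int :=
  let lines := PySem.Chars.splitlines (PySem.Chars.strip text.toList)
  let f := lines.foldl (fun g op => composeAff m (affineOf m op) g) (1, 0)
  let ab := affPower m f t
  PySem.Int.mod ((q - ab.2) * modinv ab.1 m) m

-- ===== PRECONDITION & SPEC =====
-- Pre_solve = exactly the inputs on which Python A returns: m ≠ 0 (else ZeroDivisionError
-- at '% m'), every line has a token (else IndexError at op.split()[-1]), 'deal with'/'cut'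
-- lines carry an int-parseable last token (else ValueError), and when m > 0 and t > 0 every
-- 'deal with' increment is coprime to m (else modinv raises 'not invertible'; for m < 0
-- modinv never raises, so those inputs stay inside Pre_).
def Pre_solve (text : String) (m : Int) (t : Int) (q : Int) : Prop :=
  m ≠ 0 ∧
  ∀ op ∈ PySem.Chars.splitlines (PySem.Chars.strip text.toList),
    PySem.Chars.split₀ op ≠ [] ∧
    ((PySem.Chars.startswith op "deal with".toList = true ∨
      PySem.Chars.startswith op "cut".toList = true) →
      (PySem.Int.ofChars? ((PySem.List.pyGet? (PySem.Chars.split₀ op) (-1)).getD [])).isSome = true) ∧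
    (0 < m → 0 < t → PySem.Chars.startswith op "deal with".toList = true →
      Int.gcd ((PySem.Int.ofChars? ((PySem.List.pyGet? (PySem.Chars.split₀ op) (-1)).getD [])).getD 0) m = 1)
instance (text : String) (m : Int) (t : Int) (q : Int) : Decidable (Pre_solve text m t q) := by
  unfold Pre_solve; infer_instance

def pvWitness_solve : String × Int × Int × Int := ("deal with increment 7\ncut -3\ndeal into new stack", 10, 6, 4)

def Spec_solve (text : String) (m : Int) (t : Int) (q : Int) (out : Int) : Prop := out = solve_alt text m t q
instance (text : String) (m : Int) (t : Int) (q : Int) (out : Int) : Decidable (Spec_solve text m t q out) := by unfold Spec_solve; infer_instance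

-- ===== CLAIM (what is proved, stated in full; the proofs are below) =====
def Claim_equal_solve : Prop := ∀ (text : String) (m : Int) (t : Int) (q : Int), Dom_solve text m t q → Pre_solve text m t q → Spec_solve text m t q (solve text m t q)

-- ===== LEMMAS AND PROOFS =====

-- integer (un-modded) affine composition and power: the common specification
def cI (f g : Int × Int) : Int × Int := (f.1 * g.1, f.1 * g.2 + f.2)

def pI (f : Int × Int) : Nat → Int × Int
  | 0 => (1, 0)
  | n + 1 => cI (pI f n) f

def pairEq (m : Int) (f g : Int × Int) : Prop := f.1 ≡ g.1 [ZMOD m] ∧ f.2 ≡ g.2 [ZMOD m]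

theorem pymod_modEq (x m : Int) : PySem.Int.mod x m ≡ x [ZMOD m] := by
  have h := PySem.Int.floordiv_mul_add_mod x m
  have : m ∣ x - PySem.Int.mod x m := ⟨PySem.Int.floordiv x m, by linarith⟩
  exact (Int.modEq_iff_dvd.2 this)

theorem pymod_eq_of_modEq {m x y : Int} (hm : m ≠ 0) (h : x ≡ y [ZMOD m]) :
    PySem.Int.mod x m = PySem.Int.mod y m := by
  rcases lt_or_gt_of_ne hm with hneg | hpos
  · have bx := PySem.Int.mod_neg_bounds x hneg
    have by' := PySem.Int.mod_neg_bounds y hneg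
    have hmod : PySem.Int.mod x m ≡ PySem.Int.mod y m [ZMOD m] :=
      ((pymod_modEq x m).trans h).trans (pymod_modEq y m).symm
    have hd : m ∣ PySem.Int.mod y m - PySem.Int.mod x m := Int.ModEq.dvd hmod
    have hd' : -m ∣ PySem.Int.mod y m - PySem.Int.mod x m := (neg_dvd).mpr hd
    have hz : PySem.Int.mod y m - PySem.Int.mod x m = 0 :=
      Int.eq_zero_of_abs_lt_dvd hd' (abs_lt.2 ⟨by omega, by omega⟩)
    omega
  · have h1 := PySem.Int.mod_eq_emod_of_pos (a := x) hpos
    have h2 := PySem.Int.mod_eq_emod_of_pos (a := y) hpos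
    rw [h1, h2]
    exact h

theorem pymod_idem {m : Int} (hm : m ≠ 0) (x : Int) :
    PySem.Int.mod (PySem.Int.mod x m) m = PySem.Int.mod x m :=
  pymod_eq_of_modEq hm (pymod_modEq x m)

theorem mod_modEq_mod {m x y : Int} (h : x ≡ y [ZMOD m]) :
    PySem.Int.mod x m ≡ PySem.Int.mod y m [ZMOD m] :=
  ((pymod_modEq x m).trans h).trans (pymod_modEq y m).symm

theorem cI_assoc (f g h : Int × Int) : cI (cI f g) h = cI f (cI g h) := by
  simp only [cI, Prod.mk.injEq]; constructor <;> ring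

theorem cI_one (g : Int × Int) : cI (1, 0) g = g := by
  simp [cI]

theorem cI_one_right (f : Int × Int) : cI f (1, 0) = f := by
  simp [cI]

theorem pI_one (f : Int × Int) : pI f 1 = f := by
  simp [pI, cI_one]

theorem pI_add (f : Int × Int) (a b : Nat) : pI f (a + b) = cI (pI f a) (pI f b) := by
  induction b with
  | zero => simp [pI, cI_one_right]
  | succ b ih =>
      rw [show a + (b + 1) = (a + b) + 1 by omega]
      show cI (pI f (a + b)) f = _
      rw [ih, cI_assoc]
      rfl

theorem pI_sq (f : Int × Int) (k : Nat) : pI (cI f f) k = pI f (2 * k) := by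
  induction k with
  | zero => rfl
  | succ k ih =>
      show cI (pI (cI f f) k) (cI f f) = _
      rw [ih, show 2 * (k + 1) = 2 * k + 2 by omega, pI_add]
      congr 1
      rw [show (2 : Nat) = 1 + 1 from rfl, pI_add, pI_one]

theorem cI_self_pow (f : Int × Int) (n : Nat) : cI f (pI f n) = cI (pI f n) f := by
  have h1 := pI_add f 1 n
  have h2 := pI_add f n 1
  rw [pI_one] at h1 h2
  rw [← h1, ← h2, Nat.add_comm]

theorem pairEq_refl (m : Int) (f : Int × Int) : pairEq m f f :=
  ⟨Int.ModEq.refl _, Int.ModEq.refl _⟩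

theorem cI_congr {m : Int} {f f' g g' : Int × Int} (hf : pairEq m f f') (hg : pairEq m g g') :
    pairEq m (cI f g) (cI f' g') :=
  ⟨hf.1.mul hg.1, (hf.1.mul hg.2).add hf.2⟩

theorem pI_congr {m : Int} {f f' : Int × Int} (hf : pairEq m f f') (n : Nat) :
    pairEq m (pI f n) (pI f' n) := by
  induction n with
  | zero => exact pairEq_refl m _
  | succ n ih => exact cI_congr ih hf

theorem composeAff_pairEq {m : Int} {f f' g g' : Int × Int} (hf : pairEq m f f') (hg : pairEq m g g') :
    pairEq m (composeAff m f g) (cI f' g') :=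
  ⟨(pymod_modEq _ m).trans (hf.1.mul hg.1),
   (pymod_modEq _ m).trans ((hf.1.mul hg.2).add hf.2)⟩

-- matrices of A's mpow tracked against affine pairs (bottom row ≡ (0, 1))
def matFor (m : Int) (M : Int × Int × Int × Int) (f : Int × Int) : Prop :=
  M.1 ≡ f.1 [ZMOD m] ∧ M.2.1 ≡ f.2 [ZMOD m] ∧ M.2.2.1 ≡ 0 [ZMOD m] ∧ M.2.2.2 ≡ 1 [ZMOD m]

theorem mmul_matFor {m : Int} {A B : Int × Int × Int × Int} {fa fb : Int × Int}
    (hA : matFor m A fa) (hB : matFor m B fb) : matFor m (mmul A B m) (cI fa fb) := by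
  obtain ⟨a1, a2, a3, a4⟩ := hA
  obtain ⟨b1, b2, b3, b4⟩ := hB
  refine ⟨?_, ?_, ?_, ?_⟩
  · exact (pymod_modEq _ m).trans (by simpa using (a1.mul b1).add (a2.mul b3))
  · exact (pymod_modEq _ m).trans (by simpa using (a1.mul b2).add (a2.mul b4))
  · exact (pymod_modEq _ m).trans (by simpa using (a3.mul b1).add (a4.mul b3))
  · exact (pymod_modEq _ m).trans (by simpa using (a3.mul b2).add (a4.mul b4))

theorem mpowLoop_matFor {m : Int} : ∀ (k : Nat) (e : Int), e.toNat = k →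
    ∀ (ans base : Int × Int × Int × Int) (fa fb : Int × Int),
    matFor m ans fa → matFor m base fb →
    matFor m (mpowLoop ans base e m) (cI fa (pI fb e.toNat)) := by
  intro k
  induction k using Nat.strong_induction_on with
  | _ k ih =>
    intro e hk ans base fa fb hA hB
    rw [mpowLoop]
    by_cases he : 0 < e
    · simp only [dif_pos he]
      have h2 : PySem.Int.floordiv e 2 = e / 2 :=
        PySem.Int.floordiv_eq_ediv_of_pos (by norm_num)
      have hm2 : PySem.Int.mod e 2 = e % 2 :=
        PySem.Int.mod_eq_emod_of_pos (by norm_num)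
      have hlt : (PySem.Int.floordiv e 2).toNat < k := by rw [h2]; omega
      have hrec := ih _ hlt (PySem.Int.floordiv e 2) rfl
        (if PySem.Int.mod e 2 ≠ 0 then mmul ans base m else ans) (mmul base base m)
        (if PySem.Int.mod e 2 ≠ 0 then cI fa fb else fa) (cI fb fb)
        (by split
            · exact mmul_matFor hA hB
            · exact hA)
        (mmul_matFor hB hB)
      rw [pI_sq] at hrec
      by_cases hbit : PySem.Int.mod e 2 ≠ 0
      · simp only [if_pos hbit] at hrec ⊢
        have hen : e.toNat = 2 * (PySem.Int.floordiv e 2).toNat + 1 := by rw [h2]; omega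
        have hpair : cI fa (pI fb e.toNat) =
            cI (cI fa fb) (pI fb (2 * (PySem.Int.floordiv e 2).toNat)) := by
          rw [hen]
          show cI fa (cI (pI fb (2 * (PySem.Int.floordiv e 2).toNat)) fb) = _
          rw [← cI_self_pow, ← cI_assoc]
        rw [hpair]
        exact hrec
      · simp only [if_neg hbit] at hrec ⊢
        have hen : e.toNat = 2 * (PySem.Int.floordiv e 2).toNat := by rw [h2]; omega
        rw [hen]
        exact hrec
    · simp only [dif_neg he]
      rw [show e.toNat = 0 by omega]
      show matFor m ans (cI fa (1, 0))
      rw [cI_one_right]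
      exact hA

-- for 0 < exp the loop result's first two entries are mod-reduced
theorem mpowLoop_reduced {m : Int} (hm : m ≠ 0) : ∀ (k : Nat) (e : Int), e.toNat = k → 0 < e →
    ∀ (ans base : Int × Int × Int × Int),
    PySem.Int.mod (mpowLoop ans base e m).1 m = (mpowLoop ans base e m).1 ∧
    PySem.Int.mod (mpowLoop ans base e m).2.1 m = (mpowLoop ans base e m).2.1 := by
  intro k
  induction k using Nat.strong_induction_on with
  | _ k ih =>
    intro e hk he ans base
    rw [mpowLoop]
    simp only [dif_pos he]
    have h2 : PySem.Int.floordiv e 2 = e / 2 :=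
      PySem.Int.floordiv_eq_ediv_of_pos (by norm_num)
    have hm2 : PySem.Int.mod e 2 = e % 2 :=
      PySem.Int.mod_eq_emod_of_pos (by norm_num)
    by_cases h1 : 0 < PySem.Int.floordiv e 2
    · have hlt : (PySem.Int.floordiv e 2).toNat < k := by rw [h2]; omega
      exact ih _ hlt _ rfl h1 _ _
    · -- e = 1: the inner call returns its ans, and the bit is set
      have hb : PySem.Int.mod e 2 ≠ 0 := by rw [hm2]; rw [h2] at h1; omega
      rw [mpowLoop]
      simp only [dif_neg h1, if_pos hb]
      exact ⟨pymod_idem hm _, pymod_idem hm _⟩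

theorem affPower_ok {m : Int} (hm : m ≠ 0) : ∀ (k : Nat) (e : Int), e.toNat = k → 1 ≤ e →
    ∀ (f : Int × Int),
    pairEq m (affPower m f e) (pI f e.toNat) ∧
    PySem.Int.mod (affPower m f e).1 m = (affPower m f e).1 ∧
    PySem.Int.mod (affPower m f e).2 m = (affPower m f e).2 := by
  intro k
  induction k using Nat.strong_induction_on with
  | _ k ih =>
    intro e hk he f
    rw [affPower]
    have hne : ¬ e < 1 := by omega
    by_cases he1 : e = 1
    · simp only [if_neg hne, if_pos he1]
      subst he1
      refine ⟨⟨?_, ?_⟩, pymod_idem hm _, pymod_idem hm _⟩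
      · rw [show ((1 : Int).toNat) = 1 from rfl, pI_one]; exact pymod_modEq _ m
      · rw [show ((1 : Int).toNat) = 1 from rfl, pI_one]; exact pymod_modEq _ m
    · simp only [if_neg hne, if_neg he1]
      have h2 : PySem.Int.floordiv e 2 = e / 2 :=
        PySem.Int.floordiv_eq_ediv_of_pos (by norm_num)
      have hm2 : PySem.Int.mod e 2 = e % 2 :=
        PySem.Int.mod_eq_emod_of_pos (by norm_num)
      have hlt : (PySem.Int.floordiv e 2).toNat < k := by rw [h2]; omega
      have h1 : 1 ≤ PySem.Int.floordiv e 2 := by rw [h2]; omega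
      obtain ⟨hrec, hr1, hr2⟩ := ih _ hlt (PySem.Int.floordiv e 2) rfl h1 (composeAff m f f)
      have hsq : pairEq m (composeAff m f f) (cI f f) :=
        composeAff_pairEq (pairEq_refl m f) (pairEq_refl m f)
      have hrec' : pairEq m (affPower m (composeAff m f f) (PySem.Int.floordiv e 2))
          (pI f (2 * (PySem.Int.floordiv e 2).toNat)) := by
        rw [← pI_sq]
        exact ⟨hrec.1.trans (pI_congr hsq _).1, hrec.2.trans (pI_congr hsq _).2⟩
      by_cases hbit : PySem.Int.mod e 2 ≠ 0
      · simp only [if_pos hbit]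
        have hen : e.toNat = 2 * (PySem.Int.floordiv e 2).toNat + 1 := by rw [h2]; omega
        rw [hen]
        refine ⟨?_, pymod_idem hm _, pymod_idem hm _⟩
        show pairEq m _ (cI (pI f (2 * (PySem.Int.floordiv e 2).toNat)) f)
        exact composeAff_pairEq hrec' (pairEq_refl m f)
      · simp only [if_neg hbit]
        have hen : e.toNat = 2 * (PySem.Int.floordiv e 2).toNat := by rw [h2]; omega
        rw [hen]
        exact ⟨hrec', hr1, hr2⟩

-- one line of A's simplify loop vs one composed affine step of B
theorem step_pairEq {m : Int} {ab ab' : Int × Int} (h : pairEq m ab ab') (op : List Char) :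
    pairEq m (simplifyStep m ab op) (composeAff m (affineOf m op) ab') := by
  unfold simplifyStep affineOf composeAff
  by_cases h1 : PySem.Chars.startswith op "deal with".toList
  · simp only [if_pos h1]
    refine ⟨mod_modEq_mod ?_, mod_modEq_mod ?_⟩
    · calc ab.1 * _ ≡ ab'.1 * _ [ZMOD m] := h.1.mul_right _
        _ = _ * ab'.1 := mul_comm _ _
    · calc ab.2 * _ ≡ ab'.2 * _ [ZMOD m] := h.2.mul_right _
        _ = _ * ab'.2 + 0 := by ring
  · by_cases h2 : PySem.Chars.startswith op "deal into".toList
    · simp only [if_neg h1, if_pos h2]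
      refine ⟨mod_modEq_mod ?_, mod_modEq_mod ?_⟩
      · calc -ab.1 ≡ -ab'.1 [ZMOD m] := h.1.neg
          _ = -1 * ab'.1 := by ring
      · calc -(ab.2 + 1) ≡ -(ab'.2 + 1) [ZMOD m] := (h.2.add_right 1).neg
          _ = -1 * ab'.2 + -1 := by ring
    · by_cases h3 : PySem.Chars.startswith op "cut".toList
      · simp only [if_neg h1, if_neg h2, if_pos h3]
        refine ⟨?_, mod_modEq_mod ?_⟩
        · calc ab.1 ≡ ab'.1 [ZMOD m] := h.1
            _ = 1 * ab'.1 := (one_mul _).symm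
            _ ≡ PySem.Int.mod (1 * ab'.1) m [ZMOD m] := (pymod_modEq _ m).symm
        · calc ab.2 - _ ≡ ab'.2 - _ [ZMOD m] := h.2.sub_right _
            _ = 1 * ab'.2 + -_ := by ring
      · simp only [if_neg h1, if_neg h2, if_neg h3]
        refine ⟨?_, ?_⟩
        · calc ab.1 ≡ ab'.1 [ZMOD m] := h.1
            _ = 1 * ab'.1 := (one_mul _).symm
            _ ≡ PySem.Int.mod (1 * ab'.1) m [ZMOD m] := (pymod_modEq _ m).symm
        · calc ab.2 ≡ ab'.2 [ZMOD m] := h.2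
            _ = 1 * ab'.2 + 0 := by ring
            _ ≡ PySem.Int.mod (1 * ab'.2 + 0) m [ZMOD m] := (pymod_modEq _ m).symm

theorem fold_pairEq {m : Int} : ∀ (L : List (List Char)) (ab ab' : Int × Int),
    pairEq m ab ab' →
    pairEq m (L.foldl (simplifyStep m) ab)
      (L.foldl (fun g op => composeAff m (affineOf m op) g) ab') := by
  intro L
  induction L with
  | nil => intro ab ab' h; exact h
  | cons op L ih => intro ab ab' h; exact ih _ _ (step_pairEq h op)

-- ===== VERDICT (by name: the statement is the Claim_ definition above) =====
theorem solve_spec : Claim_equal_solve := by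
  intro text m t q _hdom hpre
  simp only [Spec_solve, solve, solve_alt, mpow]
  obtain ⟨hm, -⟩ := hpre
  set L := PySem.Chars.splitlines (PySem.Chars.strip text.toList) with hL
  set fA := L.foldl (simplifyStep m) (1, 0) with hfA
  set fB := L.foldl (fun g op => composeAff m (affineOf m op) g) (1, 0) with hfB
  have hAB : pairEq m fA fB := fold_pairEq L (1, 0) (1, 0) (pairEq_refl m _)
  by_cases ht : 0 < t
  · have hA0 : matFor m ((1 : Int), (0 : Int), (0 : Int), (1 : Int)) ((1 : Int), (0 : Int)) :=
      ⟨Int.ModEq.refl _, Int.ModEq.refl _, Int.ModEq.refl _, Int.ModEq.refl _⟩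
    have hB0 : matFor m (fA.1, fA.2, (0 : Int), (1 : Int)) fA :=
      ⟨Int.ModEq.refl _, Int.ModEq.refl _, Int.ModEq.refl _, Int.ModEq.refl _⟩
    have hmat := mpowLoop_matFor t.toNat t rfl _ _ _ _ hA0 hB0
    rw [cI_one] at hmat
    have hred := mpowLoop_reduced hm t.toNat t rfl ht ((1 : Int), (0 : Int), (0 : Int), (1 : Int))
      (fA.1, fA.2, (0 : Int), (1 : Int))
    obtain ⟨hbeq, hb1, hb2⟩ := affPower_ok hm t.toNat t rfl (by omega) fB
    have hpp := pI_congr hAB t.toNat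
    set R := mpowLoop ((1 : Int), (0 : Int), (0 : Int), (1 : Int)) (fA.1, fA.2, (0 : Int), (1 : Int)) t m with hR
    set S := affPower m fB t with hS
    have hat : R.1 = S.1 := by
      rw [← hred.1, ← hb1]
      exact pymod_eq_of_modEq hm ((hmat.1.trans hpp.1).trans hbeq.1.symm)
    have hbt : R.2.1 ≡ S.2 [ZMOD m] := (hmat.2.1.trans hpp.2).trans hbeq.2.symm
    rw [hat]
    exact pymod_eq_of_modEq hm (((Int.ModEq.refl q).sub hbt).mul_right _)
  · rw [mpowLoop, affPower]
    simp only [dif_neg ht, if_pos (by omega : t < 1)]
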